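-- pv_equiv track=rewrite | github.com/pypi-data/pypi-mirror-386 | packages/riggery/riggery-0.1-py3-none-any.whl/riggery/general/numbers.py | distribute_samples
-- ===== SOURCE A (Python) =====
-- def distribute_samples(totalNumSamples:int,
--                        numSegments:int,
--                        minPerSegment:int=0) -> list[int]:
--     """
--     Distributes samples across a number of targets ('segments'). Useful for
--     scenarios like distributing a total number of samples requested by the user
--     across a number of curve segments (e.g. for up vector interpolation).
--
--     Any remainder is distributed in 'staggered' fashion rather than bunching it
--     up at either end of the segment group.
--
--     :param totalNumSamples: the total number of samples
--     :param numSegments: the number of segments to distribute the total number to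
--     :param minPerSegment: if distribution yields zero samples for some
--         segments, raise it to this number, even if it would overshoot the
--         requested *totalNumSamples*; defaults to 0
--     :return: A list of numbers, where each number is the number of samples for
--         that segment.
--     """
--     perSegment = totalNumSamples // numSegments
--     remainder = totalNumSamples % numSegments
--     allocations = [perSegment] * numSegments
--
--     if remainder:
--         for start in (0, 1):
--             if remainder:
--                 for i in range(start, numSegments, 2):
--                     if remainder:
--                         allocations[i] += 1
--                         remainder -=1
--                     else:
--                         break
--
--     if minPerSegment > 0:
--         allocations = [max(minPerSegment, x) for x in allocations]
--
--     return allocations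
-- ===== SOURCE B (Python) =====
-- def distribute_samples(totalNumSamples:int,
--                        numSegments:int,
--                        minPerSegment:int=0) -> list[int]:
--     perSegment = totalNumSamples // numSegments
--     remainder = totalNumSamples % numSegments
--     half = (numSegments + 1) // 2
--     allocations = []
--     for i in range(numSegments):
--         rank = i // 2 if i % 2 == 0 else half + i // 2
--         allocations.append(perSegment + (1 if rank < remainder else 0))
--     if minPerSegment > 0:
--         allocations = [max(minPerSegment, x) for x in allocations]
--     return allocations
-- ===== Notes on version B (the rewrite author's own statement) =====
-- stated objective: simpler
-- what changed: Replaces A's two stateful remainder-decrementing passes (with break) over even then odd indices by a single pass that computes each index's rank in the staggered order in closed form (rank = i//2 for even i, (numSegments+1)//2 + i//2 for odd i) and adds 1 iff rank < remainder.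
-- outside the precondition, e.g. on distribute_samples(5, 0, 0): A raises ZeroDivisionError, B raises ZeroDivisionError
import Mathlib
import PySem

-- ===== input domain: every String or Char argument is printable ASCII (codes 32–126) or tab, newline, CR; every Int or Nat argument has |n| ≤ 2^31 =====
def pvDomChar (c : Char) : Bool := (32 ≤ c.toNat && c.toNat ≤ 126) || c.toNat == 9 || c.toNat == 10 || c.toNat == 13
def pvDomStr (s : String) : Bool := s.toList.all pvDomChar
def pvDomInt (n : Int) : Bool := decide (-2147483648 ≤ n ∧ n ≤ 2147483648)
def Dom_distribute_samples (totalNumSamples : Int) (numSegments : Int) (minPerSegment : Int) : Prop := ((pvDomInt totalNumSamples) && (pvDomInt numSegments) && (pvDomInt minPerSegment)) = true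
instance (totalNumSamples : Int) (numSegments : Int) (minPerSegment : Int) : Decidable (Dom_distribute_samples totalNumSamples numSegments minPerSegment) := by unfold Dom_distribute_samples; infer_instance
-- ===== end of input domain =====

-- B replaces A's two stateful remainder-decrementing passes by one pass computing each
-- index's staggered rank in closed form (objective: simpler decomposition, same cost).


-- ===== PORT A =====
-- body of A's inner loops: 'if remainder: allocations[i] += 1; remainder -= 1; else: break'
-- (continuing with an unchanged state once remainder is 0 is exactly Python's break here)
def pvStep (st : List Int × Int) (i : Int) : List Int × Int :=
  if st.2 ≠ 0 then (st.1.modify i.toNat (· + 1), st.2 - 1) else st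

-- A's allocations list before the minPerSegment clamp
def pvAllocA (totalNumSamples : Int) (numSegments : Int) : List Int :=
  let perSegment := PySem.Int.floordiv totalNumSamples numSegments
  let remainder := PySem.Int.mod totalNumSamples numSegments
  let allocations := PySem.List.pyRepeat [perSegment] numSegments
  let st : List Int × Int :=
    if remainder ≠ 0 then
      -- for start in (0, 1): if remainder: for i in range(start, numSegments, 2): …
      let st0 :=
        if remainder ≠ 0 then
          (PySem.List.pyRange 0 numSegments 2).foldl pvStep (allocations, remainder)
        else (allocations, remainder)
      if st0.2 ≠ 0 then (PySem.List.pyRange 1 numSegments 2).foldl pvStep st0 else st0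
    else (allocations, remainder)
  st.1

def distribute_samples (totalNumSamples : Int) (numSegments : Int) (minPerSegment : Int) : List Int :=
  let allocations := pvAllocA totalNumSamples numSegments
  if minPerSegment > 0 then allocations.map (fun x => max minPerSegment x) else allocations

-- ===== PORT B =====
-- B's allocations list before the minPerSegment clamp
def pvAllocB (totalNumSamples : Int) (numSegments : Int) : List Int :=
  let perSegment := PySem.Int.floordiv totalNumSamples numSegments
  let remainder := PySem.Int.mod totalNumSamples numSegments
  let half := PySem.Int.floordiv (numSegments + 1) 2
  (PySem.List.pyRange 0 numSegments 1).foldl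
    (fun acc i =>
      let rank := if PySem.Int.mod i 2 == 0 then PySem.Int.floordiv i 2
                  else half + PySem.Int.floordiv i 2
      acc ++ [perSegment + (if rank < remainder then 1 else 0)]) []

def distribute_samples_alt (totalNumSamples : Int) (numSegments : Int) (minPerSegment : Int) : List Int :=
  let allocations := pvAllocB totalNumSamples numSegments
  if minPerSegment > 0 then allocations.map (fun x => max minPerSegment x) else allocations

-- ===== PRECONDITION & SPEC =====
-- Pre_ excludes exactly numSegments = 0, where A's first '//' raises ZeroDivisionError.
def Pre_distribute_samples (totalNumSamples : Int) (numSegments : Int) (minPerSegment : Int) : Prop :=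
  numSegments ≠ 0
instance (totalNumSamples : Int) (numSegments : Int) (minPerSegment : Int) : Decidable (Pre_distribute_samples totalNumSamples numSegments minPerSegment) := by unfold Pre_distribute_samples; infer_instance

def pvWitness_distribute_samples : Int × Int × Int := (11, 4, 1)

def Spec_distribute_samples (totalNumSamples : Int) (numSegments : Int) (minPerSegment : Int) (out : List Int) : Prop := out = distribute_samples_alt totalNumSamples numSegments minPerSegment
instance (totalNumSamples : Int) (numSegments : Int) (minPerSegment : Int) (out : List Int) : Decidable (Spec_distribute_samples totalNumSamples numSegments minPerSegment out) := by unfold Spec_distribute_samples; infer_instance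

-- ===== CLAIM (what is proved, stated in full; the proofs are below) =====
def Claim_equal_distribute_samples : Prop := ∀ (totalNumSamples : Int) (numSegments : Int) (minPerSegment : Int), Dom_distribute_samples totalNumSamples numSegments minPerSegment → Pre_distribute_samples totalNumSamples numSegments minPerSegment → Spec_distribute_samples totalNumSamples numSegments minPerSegment (distribute_samples totalNumSamples numSegments minPerSegment)

-- ===== LEMMAS AND PROOFS =====

-- the incrementing pass A's fold performs on the first rem.toNat indices
def pvInc (alloc : List Int) (idxs : List Int) : List Int :=
  idxs.foldl (fun a i => a.modify i.toNat (· + 1)) alloc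

-- A's remainder-decrementing fold = increment the first rem.toNat indices, decrement rem accordingly
lemma pvStep_foldl (idxs : List Int) : ∀ (alloc : List Int) (rem : Int), 0 ≤ rem →
    idxs.foldl pvStep (alloc, rem)
      = (pvInc alloc (idxs.take rem.toNat), rem - min rem idxs.length) := by
  induction idxs with
  | nil => intro alloc rem h; simp [pvInc]; omega
  | cons i tl ih =>
    intro alloc rem h
    by_cases hr : rem = 0
    · subst hr
      simp only [List.foldl_cons, pvStep]
      rw [if_neg (by simp)]
      rw [ih alloc 0 le_rfl]
      simp [pvInc]
      omega
    · simp only [List.foldl_cons, pvStep]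
      rw [if_pos (by simpa using hr)]
      rw [ih _ (rem - 1) (by omega)]
      rw [Prod.mk.injEq]
      constructor
      · have : rem.toNat = (rem - 1).toNat + 1 := by omega
        rw [this]
        simp [pvInc]
      · simp only [List.length_cons]
        push_cast
        omega

lemma pvInc_length (idxs : List Int) : ∀ (alloc : List Int),
    (pvInc alloc idxs).length = alloc.length := by
  induction idxs with
  | nil => intro alloc; rfl
  | cons i tl ih => intro alloc; simp [pvInc] at ih ⊢; rw [ih]; simp

lemma pvInc_getElem (idxs : List Int) : ∀ (alloc : List Int) (j : Nat)
    (h : j < (pvInc alloc idxs).length) (h' : j < alloc.length),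
    (∀ i ∈ idxs, 0 ≤ i) →
    (pvInc alloc idxs)[j] = alloc[j] + idxs.count ((j : Nat) : Int) := by
  induction idxs with
  | nil => intro alloc j h h' _; simp [pvInc]
  | cons i tl ih =>
    intro alloc j h h' hnn
    have hi : 0 ≤ i := hnn i (by simp)
    have hrec := ih (alloc.modify i.toNat (· + 1)) j
      (by simpa [pvInc, List.length_modify] using h) (by simpa using h')
      (fun x hx => hnn x (by simp [hx]))
    simp only [pvInc, List.foldl_cons] at hrec ⊢
    rw [hrec, List.getElem_modify]
    rw [List.count_cons]
    by_cases he : i.toNat = j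
    · have hb : (i == ((j : Nat) : Int)) = true := by simp; omega
      rw [if_pos he, hb]
      simp
      ring
    · have hb : (i == ((j : Nat) : Int)) = false := by simp; omega
      rw [if_neg he, hb]
      simp

-- count of an element in a step-2 arithmetic progression
lemma pvCount_range2 (a x : Int) (K : Nat) :
    (((List.range K).map (fun k : Nat => a + 2 * (k : Int))).count x)
      = if ∃ p : Nat, p < K ∧ a + 2 * (p : Int) = x then 1 else 0 := by
  have hnd : ((List.range K).map (fun k : Nat => a + 2 * (k : Int))).Nodup := by
    refine List.Nodup.map ?_ (List.nodup_range)
    intro p q hpq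
    simp only [add_right_inj] at hpq
    omega
  by_cases hm : x ∈ (List.range K).map (fun k : Nat => a + 2 * (k : Int))
  · rw [if_pos]
    · exact List.count_eq_one_of_mem hnd hm
    · obtain ⟨p, hp, he⟩ := List.mem_map.mp hm
      exact ⟨p, List.mem_range.mp hp, he⟩
  · rw [if_neg]
    · exact List.count_eq_zero.mpr hm
    · rintro ⟨p, hp, he⟩
      exact hm (List.mem_map.mpr ⟨p, List.mem_range.mpr hp, he⟩)

-- the two allocation lists agree
lemma pvAlloc_eq (t n : Int) (hn : n ≠ 0) : pvAllocA t n = pvAllocB t n := by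
  by_cases hpos : 0 < n
  · -- n > 0
    have h2 : (0:Int) < 2 := by norm_num
    have hr0 : 0 ≤ PySem.Int.mod t n := PySem.Int.mod_nonneg t hpos
    have hrlt : PySem.Int.mod t n < n := PySem.Int.mod_lt t hpos
    set per := PySem.Int.floordiv t n with hper
    set r := PySem.Int.mod t n with hrdef
    -- range decompositions
    have hev : PySem.List.pyRange 0 n 2
        = (List.range ((n + 1) / 2).toNat).map (fun k : Nat => 0 + 2 * (k : Int)) := by
      rw [PySem.List.pyRange_of_pos 0 n h2, if_pos hpos]
      have h3 : n - 0 + 2 - 1 = n + 1 := by ring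
      rw [h3]
    have hod : PySem.List.pyRange 1 n 2
        = (List.range (n / 2).toNat).map (fun k : Nat => 1 + 2 * (k : Int)) := by
      rw [PySem.List.pyRange_of_pos 1 n h2]
      by_cases h1 : (1:Int) < n
      · rw [if_pos h1]
        have h3 : n - 1 + 2 - 1 = n := by ring
        rw [h3]
      · rw [if_neg h1]
        have h3 : (n / 2).toNat = 0 := by omega
        rw [h3]
    set E : Nat := ((n + 1) / 2).toNat with hE
    set O : Nat := (n / 2).toNat with hO
    have hB : pvAllocB t n
        = (PySem.List.pyRange 0 n 1).map (fun i =>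
            per + (if (if PySem.Int.mod i 2 == 0 then PySem.Int.floordiv i 2
                       else PySem.Int.floordiv (n + 1) 2 + PySem.Int.floordiv i 2) < r
                   then 1 else 0)) := by
      unfold pvAllocB
      rw [PySem.List.foldl_append_singleton_eq_map
        (f := fun i => per + (if (if PySem.Int.mod i 2 == 0 then PySem.Int.floordiv i 2
                       else PySem.Int.floordiv (n + 1) 2 + PySem.Int.floordiv i 2) < r
                   then 1 else 0))]
      simp
    by_cases hrz : r = 0
    · -- no remainder: both are the constant list
      have hA : pvAllocA t n = List.replicate n.toNat per := by
        simp only [pvAllocA]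
        rw [← hrdef, ← hper, hrz]
        simp [PySem.List.pyRepeat_singleton]
      rw [hA, hB, hrz]
      have : ∀ i ∈ PySem.List.pyRange 0 n 1,
          (per + (if (if PySem.Int.mod i 2 == 0 then PySem.Int.floordiv i 2
                      else PySem.Int.floordiv (n + 1) 2 + PySem.Int.floordiv i 2) < 0
                  then 1 else 0)) = per := by
        intro i hi
        have hi0 : 0 ≤ i := ((PySem.List.mem_pyRange_one).mp hi).1
        have e1 : PySem.Int.floordiv i 2 = i / 2 := PySem.Int.floordiv_eq_ediv_of_pos h2
        have e2 : PySem.Int.floordiv (n + 1) 2 = (n + 1) / 2 :=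
          PySem.Int.floordiv_eq_ediv_of_pos h2
        rw [e1, e2]
        have : ¬ ((if PySem.Int.mod i 2 == 0 then i / 2 else (n + 1) / 2 + i / 2) < 0) := by
          split <;> omega
        rw [if_neg this]
        ring
      rw [List.map_congr_left this]
      simp [List.map_const', PySem.List.length_pyRange_one]
    · -- remainder present
      have hrpos : 0 < r := lt_of_le_of_ne hr0 (Ne.symm hrz)
      have hEl : (PySem.List.pyRange 0 n 2).length = E := by rw [hev]; simp
      have hOl : (PySem.List.pyRange 1 n 2).length = O := by rw [hod]; simp
      -- characterize A's pre-clamp list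
      set r1 : Int := r - min r (E : Int) with hr1
      have hr1nn : 0 ≤ r1 := by omega
      have hA : pvAllocA t n
          = pvInc (pvInc (List.replicate n.toNat per)
              ((PySem.List.pyRange 0 n 2).take r.toNat))
              ((PySem.List.pyRange 1 n 2).take r1.toNat) := by
        simp only [pvAllocA]
        rw [← hrdef, ← hper]
        rw [if_pos hrz, if_pos hrz]
        rw [PySem.List.pyRepeat_singleton, pvStep_foldl _ _ _ hr0]
        rw [hEl]
        by_cases hst : r1 = 0
        · rw [← hr1, if_neg (by simpa using hst), hst]
          simp [pvInc]
        · rw [← hr1, if_pos (by simpa using hst)]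
          rw [pvStep_foldl _ _ _ hr1nn]
      rw [hA, hB]
      -- elementwise
      apply List.ext_getElem
      · rw [pvInc_length, pvInc_length]
        simp [PySem.List.length_pyRange_one]
      intro j hj hj'
      have hjn : j < n.toNat := by
        have := hj; rw [pvInc_length, pvInc_length] at this; simpa using this
      have hlen1 : j < (pvInc (List.replicate n.toNat per)
          ((PySem.List.pyRange 0 n 2).take r.toNat)).length := by
        rw [pvInc_length]; simpa using hjn
      have hnnod : ∀ i ∈ (PySem.List.pyRange 1 n 2).take r1.toNat, 0 ≤ i := by
        intro i hi
        have := (PySem.List.mem_pyRange_iff_of_pos h2 i).mp (List.mem_of_mem_take hi)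
        omega
      have hnnev : ∀ i ∈ (PySem.List.pyRange 0 n 2).take r.toNat, 0 ≤ i := by
        intro i hi
        have := (PySem.List.mem_pyRange_iff_of_pos h2 i).mp (List.mem_of_mem_take hi)
        omega
      rw [pvInc_getElem _ _ _ hj hlen1 hnnod]
      rw [pvInc_getElem _ _ _ hlen1 (by simpa using hjn) hnnev]
      rw [List.getElem_replicate]
      -- counts
      have hcev : ((PySem.List.pyRange 0 n 2).take r.toNat).count ((j : Nat) : Int)
          = if ∃ p : Nat, p < min r.toNat E ∧ 0 + 2 * (p : Int) = (j : Int) then 1 else 0 := by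
        rw [hev, ← List.map_take, List.take_range, pvCount_range2]
      have hcod : ((PySem.List.pyRange 1 n 2).take r1.toNat).count ((j : Nat) : Int)
          = if ∃ p : Nat, p < min r1.toNat O ∧ 1 + 2 * (p : Int) = (j : Int) then 1 else 0 := by
        rw [hod, ← List.map_take, List.take_range, pvCount_range2]
      rw [hcev, hcod]
      -- B's element
      rw [List.getElem_map, PySem.List.getElem_pyRange_one]
      have e1 : PySem.Int.floordiv (0 + (j : Int)) 2 = (0 + (j : Int)) / 2 :=
        PySem.Int.floordiv_eq_ediv_of_pos h2
      have e2 : PySem.Int.floordiv (n + 1) 2 = (n + 1) / 2 :=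
        PySem.Int.floordiv_eq_ediv_of_pos h2
      have e3 : PySem.Int.mod (0 + (j : Int)) 2 = (0 + (j : Int)) % 2 :=
        PySem.Int.mod_eq_emod_of_pos h2
      rw [e1, e2, e3]
      -- pure arithmetic now
      have hEcast : (E : Int) = (n + 1) / 2 := by omega
      have hOcast : (O : Int) = n / 2 := by omega
      rcases Nat.even_or_odd j with ⟨p, hp⟩ | ⟨p, hp⟩
      · -- j = 2p even
        have hx : ((0 + (j : Int)) % 2 == 0) = true := by simp; omega
        rw [hx, if_pos rfl]
        have h1 : (∃ q : Nat, q < min r.toNat E ∧ 0 + 2 * (q : Int) = (j : Int)) ↔ p < r.toNat := by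
          constructor
          · rintro ⟨q, hq, he⟩; omega
          · intro hpr
            exact ⟨p, by omega, by omega⟩
        have h2' : ¬ (∃ q : Nat, q < min r1.toNat O ∧ 1 + 2 * (q : Int) = (j : Int)) := by
          rintro ⟨q, hq, he⟩; omega
        rw [if_neg h2']
        by_cases hc : p < r.toNat
        · rw [if_pos (h1.mpr hc), if_pos (by omega)]
          push_cast; ring
        · rw [if_neg (fun h => hc (h1.mp h)), if_neg (by omega)]
          push_cast; ring
      · -- j = 2p + 1 odd
        have hx : ((0 + (j : Int)) % 2 == 0) = false := by simp; omega
        rw [hx]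
        simp only [Bool.false_eq_true, if_false]
        have h1 : ¬ (∃ q : Nat, q < min r.toNat E ∧ 0 + 2 * (q : Int) = (j : Int)) := by
          rintro ⟨q, hq, he⟩; omega
        rw [if_neg h1]
        have h2' : (∃ q : Nat, q < min r1.toNat O ∧ 1 + 2 * (q : Int) = (j : Int)) ↔
            ((n + 1) / 2 + (j : Int) / 2 < r) := by
          constructor
          · rintro ⟨q, hq, he⟩; omega
          · intro hlt
            exact ⟨p, by omega, by omega⟩
        by_cases hc : (n + 1) / 2 + (j : Int) / 2 < r
        · rw [if_pos (h2'.mpr hc), if_pos (by omega)]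
          push_cast; ring
        · rw [if_neg (fun h => hc (h2'.mp h)), if_neg (by omega)]
          push_cast; ring
  · -- n < 0 : both lists are empty
    have hneg : n < 0 := by omega
    have hev : PySem.List.pyRange 0 n 2 = [] := by
      rw [PySem.List.pyRange_of_pos 0 n (by norm_num), if_neg (by omega)]; simp
    have hod : PySem.List.pyRange 1 n 2 = [] := by
      rw [PySem.List.pyRange_of_pos 1 n (by norm_num), if_neg (by omega)]; simp
    have hrep : PySem.List.pyRepeat [PySem.Int.floordiv t n] n = [] := by
      rw [PySem.List.pyRepeat_singleton]
      have : n.toNat = 0 := by omega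
      rw [this]; rfl
    have hA : pvAllocA t n = [] := by
      simp only [pvAllocA]
      rw [hrep, hev, hod]
      simp
    have hB : pvAllocB t n = [] := by
      unfold pvAllocB
      rw [PySem.List.pyRange_one_eq_nil (by omega)]
      rfl
    rw [hA, hB]

-- ===== VERDICT (by name: the statement is the Claim_ definition above) =====
theorem distribute_samples_spec : Claim_equal_distribute_samples := by
  intro t n m _ hn
  unfold Spec_distribute_samples distribute_samples distribute_samples_alt
  rw [pvAlloc_eq t n hn]
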